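-- pv_equiv track=rewrite | github.com/klausxie/sql-optimizer-skill | python/sqlopt/application/v9_stages/overview.py | _render_risk_summary
-- ===== SOURCE A (Python) =====
-- from typing import Any
--
-- def _render_risk_summary(risks: list[dict[str, Any]]) -> str:
--     """Render a risk summary section.
--
--     Args:
--         risks: List of risk dictionaries with keys like:
--             - severity: "high", "medium", "low"
--             - risk_type: Type of risk (e.g., "prefix_wildcard")
--             - description: Human-readable description
--             - location: Where the risk was found
--
--     Returns:
--         Formatted markdown risk summary section.
--     """
--     if not risks:
--         return ""
--
--     lines = ["## 问题与风险", ""]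
--
--     # Group risks by severity
--     high_risks = [r for r in risks if r.get("severity") == "high"]
--     medium_risks = [r for r in risks if r.get("severity") == "medium"]
--     low_risks = [r for r in risks if r.get("severity") == "low"]
--
--     if high_risks:
--         lines.append("### 🔴 高风险")
--         for risk in high_risks:
--             lines.append(
--                 f"- **{risk.get('risk_type', 'unknown')}**: {risk.get('description', '')}"
--             )
--         lines.append("")
--
--     if medium_risks:
--         lines.append("### 🟡 中风险")
--         for risk in medium_risks:
--             lines.append(
--                 f"- **{risk.get('risk_type', 'unknown')}**: {risk.get('description', '')}"
--             )
--         lines.append("")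
--
--     if low_risks:
--         lines.append("### 🟢 低风险")
--         for risk in low_risks:
--             lines.append(
--                 f"- **{risk.get('risk_type', 'unknown')}**: {risk.get('description', '')}"
--             )
--         lines.append("")
--
--     return "\n".join(lines) + "\n"
-- ===== SOURCE B (Python) =====
-- def _render_risk_summary(risks):
--     if not risks:
--         return ""
--     buckets = {"high": [], "medium": [], "low": []}
--     for r in risks:
--         s = r.get("severity")
--         if s in buckets:
--             buckets[s].append(r)
--     lines = ["## 问题与风险", ""]
--     for sev, header in (("high", "### 🔴 高风险"),
--                         ("medium", "### 🟡 中风险"),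
--                         ("low", "### 🟢 低风险")):
--         group = buckets[sev]
--         if group:
--             lines.append(header)
--             lines.extend(
--                 f"- **{r.get('risk_type', 'unknown')}**: {r.get('description', '')}"
--                 for r in group
--             )
--             lines.append("")
--     return "\n".join(lines) + "\n"
-- ===== Notes on version B (the rewrite author's own statement) =====
-- stated objective: simpler
-- what changed: B buckets the risks by severity in a single pass over the input instead of A's three separate filtering passes, then renders the three sections from an ordered (severity, header) table instead of three copy-pasted if-blocks.
import Mathlib
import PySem

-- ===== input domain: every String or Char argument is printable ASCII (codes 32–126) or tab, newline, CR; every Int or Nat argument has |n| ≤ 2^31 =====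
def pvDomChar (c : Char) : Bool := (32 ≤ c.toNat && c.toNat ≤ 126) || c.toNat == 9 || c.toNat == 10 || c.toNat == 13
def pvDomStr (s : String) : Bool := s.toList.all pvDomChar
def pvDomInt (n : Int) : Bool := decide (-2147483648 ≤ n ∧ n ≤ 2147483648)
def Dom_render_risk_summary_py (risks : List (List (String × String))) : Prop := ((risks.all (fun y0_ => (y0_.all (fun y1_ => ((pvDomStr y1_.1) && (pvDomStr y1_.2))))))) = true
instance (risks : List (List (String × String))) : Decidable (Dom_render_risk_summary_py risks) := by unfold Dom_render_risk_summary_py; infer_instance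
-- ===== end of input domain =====

-- B buckets risks by severity in one pass and renders from an ordered (severity, header) table,
-- replacing A's three filter passes and three copy-pasted if-blocks (objective: simpler).


-- risk.get(k): first-match lookup in the association list (Python dict has unique keys)
def pvLookup (r : List (String × String)) (k : String) : Option String :=
  (r.find? (fun p => p.1 == k)).map (·.2)

-- the f-string "- **{risk.get('risk_type', 'unknown')}**: {risk.get('description', '')}"
def pvFmt (r : List (String × String)) : String :=
  "- **" ++ ((pvLookup r "risk_type").getD "unknown") ++ "**: " ++ ((pvLookup r "description").getD "")

-- ===== PORT A =====
def render_risk_summary_py (risks : List (List (String × String))) : String :=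
  if risks = [] then "" else
  let lines : List String := ["## 问题与风险", ""]
  let high_risks := risks.filter (fun r => pvLookup r "severity" == some "high")
  let medium_risks := risks.filter (fun r => pvLookup r "severity" == some "medium")
  let low_risks := risks.filter (fun r => pvLookup r "severity" == some "low")
  let lines := if high_risks.isEmpty then lines else
    lines ++ "### 🔴 高风险" :: high_risks.map pvFmt ++ [""]
  let lines := if medium_risks.isEmpty then lines else
    lines ++ "### 🟡 中风险" :: medium_risks.map pvFmt ++ [""]
  let lines := if low_risks.isEmpty then lines else
    lines ++ "### 🟢 低风险" :: low_risks.map pvFmt ++ [""]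
  PySem.Str.join "\n" lines ++ "\n"

-- ===== PORT B =====
def render_risk_summary_py_alt (risks : List (List (String × String))) : String :=
  if risks = [] then "" else
  let buckets : PySem.Dict String (List (List (String × String))) :=
    PySem.Dict.ofList [("high", []), ("medium", []), ("low", [])]
  let buckets := risks.foldl (fun d r =>
    match pvLookup r "severity" with
    | some s => if d.contains s then d.modify s [] (· ++ [r]) else d
    | none => d) buckets
  let config : List (String × String) :=
    [("high", "### 🔴 高风险"), ("medium", "### 🟡 中风险"), ("low", "### 🟢 低风险")]
  let lines := config.foldl (fun acc p =>
    let group := buckets.getD p.1 []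
    if group.isEmpty then acc else acc ++ p.2 :: group.map pvFmt ++ [""])
    ["## 问题与风险", ""]
  PySem.Str.join "\n" lines ++ "\n"

-- ===== PRECONDITION & SPEC =====
def Spec_render_risk_summary_py (risks : List (List (String × String))) (out : String) : Prop := out = render_risk_summary_py_alt risks
instance (risks : List (List (String × String))) (out : String) : Decidable (Spec_render_risk_summary_py risks out) := by unfold Spec_render_risk_summary_py; infer_instance

-- ===== CLAIM (what is proved, stated in full; the proofs are below) =====
def Claim_equal_render_risk_summary_py : Prop := ∀ (risks : List (List (String × String))), Dom_render_risk_summary_py risks → Spec_render_risk_summary_py risks (render_risk_summary_py risks)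

-- ===== LEMMAS AND PROOFS =====

-- B's bucket fold collects, per contained key, exactly A's filtered sublist (in order).
theorem pv_bucket (l : List (List (String × String)))
    (d : PySem.Dict String (List (List (String × String)))) (c : String)
    (hc : d.contains c = true) :
    (l.foldl (fun d r =>
      match pvLookup r "severity" with
      | some s => if d.contains s then d.modify s [] (· ++ [r]) else d
      | none => d) d).getD c []
    = d.getD c [] ++ l.filter (fun r => pvLookup r "severity" == some c) := by
  induction l generalizing d with
  | nil => simp
  | cons r l ih =>
    simp only [List.foldl_cons, List.filter_cons]
    cases hs : pvLookup r "severity" with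
    | none => simp [ih d hc]
    | some s =>
      have hred : (match (some s : Option String) with
          | some s => if d.contains s = true then d.modify s [] (fun x => x ++ [r]) else d
          | none => d) = if d.contains s = true then d.modify s [] (fun x => x ++ [r]) else d := rfl
      rw [hred]
      by_cases hsc : s = c
      · subst hsc
        rw [if_pos hc]
        have hc' : (d.modify s [] (· ++ [r])).contains s = true := by
          simp [PySem.Dict.contains_modify, hc]
        rw [ih _ hc']
        simp [PySem.Dict.getD_modify_self]
      · rw [if_neg (show ¬((some s == some c) = true) by simp [hsc])]
        by_cases hds : d.contains s = true
        · rw [if_pos hds]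
          have hc' : (d.modify s [] (· ++ [r])).contains c = true := by
            simp [PySem.Dict.contains_modify, hc]
          rw [ih _ hc']
          simp only [PySem.Dict.getD_modify, if_neg (fun h : c = s => hsc h.symm)]
        · rw [if_neg hds, ih d hc]

-- ===== VERDICT (by name: the statement is the Claim_ definition above) =====
theorem render_risk_summary_py_spec : Claim_equal_render_risk_summary_py := by
  intro risks _
  unfold Spec_render_risk_summary_py render_risk_summary_py render_risk_summary_py_alt
  by_cases h : risks = []
  · simp [h]
  · simp only [if_neg h, List.foldl_cons, List.foldl_nil]
    rw [pv_bucket risks _ "high" (by decide),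
        pv_bucket risks _ "medium" (by decide),
        pv_bucket risks _ "low" (by decide)]
    rfl
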